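-- pv_equiv track=rewrite | github.com/jackjulianhickey/Naive_Bayes_Algorithm | Naive_Bayes.py | check_if_emoticon
-- ===== SOURCE A (Python) =====
-- def check_if_emoticon(words):
--     # a list of various emoticons
--     happy = [":d", ":-d", ":)", ":-)", ";)", ";-)", ":p", ":-p", ":P", ":-P", ":D", ":-D"]
--     surprised = [":o", ":-o"]
--     sad = [":(", ":-(", ":/", ":-/", ":'("]
--
--     emoticons = {"happy": happy, "surprised": surprised, "sad": sad}
--
--     # if the word matches an emoticon return that emoticons word
--     for emotions, emoticons in emoticons.items():
--         if words in emoticons: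
--             return emotions
--
--     return words
-- ===== SOURCE B (Python) =====
-- # B parses the token's character structure (eye, optional nose, mouth) instead of scanning category lists.
-- _MOUTH = {'d': 'happy', 'D': 'happy', ')': 'happy', 'p': 'happy', 'P': 'happy',
--           'o': 'surprised', '(': 'sad', '/': 'sad'}
--
-- def check_if_emoticon(words):
--     n = len(words)
--     if n == 2:
--         if words[0] == ':':
--             return _MOUTH.get(words[1], words)
--         if words == ';)':
--             return 'happy'
--     elif n == 3:
--         if words[0] == ':' and words[1] == '-':
--             return _MOUTH.get(words[2], words)
--         if words == ';-)':
--             return 'happy'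
--         if words == ":'(":
--             return 'sad'
--     return words
-- ===== Notes on version B (the rewrite author's own statement) =====
-- stated objective: alternative
-- what changed: B classifies by parsing the token's character structure (length, eye character, optional nose, mouth character with a mouth-to-emotion map) instead of scanning per-category emoticon lists for a whole-string match.
import Mathlib
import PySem

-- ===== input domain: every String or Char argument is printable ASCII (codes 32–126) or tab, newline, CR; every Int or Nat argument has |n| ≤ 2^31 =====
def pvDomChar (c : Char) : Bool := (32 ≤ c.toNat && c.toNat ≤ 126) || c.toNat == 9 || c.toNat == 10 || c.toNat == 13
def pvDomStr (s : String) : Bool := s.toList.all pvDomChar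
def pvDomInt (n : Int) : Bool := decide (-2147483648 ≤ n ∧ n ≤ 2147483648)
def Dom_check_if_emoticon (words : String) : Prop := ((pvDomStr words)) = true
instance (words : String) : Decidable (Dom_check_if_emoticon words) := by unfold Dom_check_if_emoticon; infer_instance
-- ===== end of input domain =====

-- B replaces A's per-category list scan by parsing the token's character structure
-- (eye char, optional nose, mouth char → emotion): an alternative decomposition of the same classification.

-- ===== PORT A =====
-- the for-loop over emoticons.items() with early return, as structural recursion
def pvLoopA (w : String) : List (String × List String) → String
  | [] => w
  | (emotions, emoticons) :: rest => if w ∈ emoticons then emotions else pvLoopA w rest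

def check_if_emoticon (words : String) : String :=
  let happy := [":d", ":-d", ":)", ":-)", ";)", ";-)", ":p", ":-p", ":P", ":-P", ":D", ":-D"]
  let surprised := [":o", ":-o"]
  let sad := [":(", ":-(", ":/", ":-/", ":'("]
  let emoticons := PySem.Dict.ofList [("happy", happy), ("surprised", surprised), ("sad", sad)]
  pvLoopA words emoticons.items

-- ===== PORT B =====
-- _MOUTH.get(m, …): the mouth character decides the emotion, if any
def pvMouth (m : Char) : Option String :=
  if m = 'd' ∨ m = 'D' ∨ m = ')' ∨ m = 'p' ∨ m = 'P' then some "happy"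
  else if m = 'o' then some "surprised"
  else if m = '(' ∨ m = '/' then some "sad"
  else none

def check_if_emoticon_alt (words : String) : String :=
  match words.toList with
  | [e, m] =>
      if e = ':' then (pvMouth m).getD words
      else if words = ";)" then "happy"
      else words
  | [e, n, m] =>
      if e = ':' ∧ n = '-' then (pvMouth m).getD words
      else if words = ";-)" then "happy"
      else if words = ":'(" then "sad"
      else words
  | _ => words

-- ===== PRECONDITION & SPEC =====
def Spec_check_if_emoticon (words : String) (out : String) : Prop := out = check_if_emoticon_alt words
instance (words : String) (out : String) : Decidable (Spec_check_if_emoticon words out) := by unfold Spec_check_if_emoticon; infer_instance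

-- ===== CLAIM (what is proved, stated in full; the proofs are below) =====
def Claim_equal_check_if_emoticon : Prop := ∀ (words : String), Dom_check_if_emoticon words → Spec_check_if_emoticon words (check_if_emoticon words)

-- ===== LEMMAS AND PROOFS =====

lemma pv_ofList_eq_lit (l : List Char) (s : String) : (String.ofList l = s) ↔ l = s.toList := by
  constructor
  · intro h; rw [← h, String.toList_ofList]
  · intro h; rw [h, String.ofList_toList]

-- A's loop over the concrete dict, written out as nested membership tests
lemma pv_A_eq (w : String) :
    check_if_emoticon w =
      if w ∈ [":d", ":-d", ":)", ":-)", ";)", ";-)", ":p", ":-p", ":P", ":-P", ":D", ":-D"] then "happy"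
      else if w ∈ [":o", ":-o"] then "surprised"
      else if w ∈ [":(", ":-(", ":/", ":-/", ":'("] then "sad"
      else w := by
  have hitems : (PySem.Dict.ofList
      [("happy", [":d", ":-d", ":)", ":-)", ";)", ";-)", ":p", ":-p", ":P", ":-P", ":D", ":-D"]),
       ("surprised", [":o", ":-o"]),
       ("sad", [":(", ":-(", ":/", ":-/", ":'("])]).items =
      [("happy", [":d", ":-d", ":)", ":-)", ";)", ";-)", ":p", ":-p", ":P", ":-P", ":D", ":-D"]),
       ("surprised", [":o", ":-o"]),
       ("sad", [":(", ":-(", ":/", ":-/", ":'("])] := by decide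
  show pvLoopA w (PySem.Dict.ofList
      [("happy", [":d", ":-d", ":)", ":-)", ";)", ";-)", ":p", ":-p", ":P", ":-P", ":D", ":-D"]),
       ("surprised", [":o", ":-o"]),
       ("sad", [":(", ":-(", ":/", ":-/", ":'("])]).items = _
  rw [hitems]
  simp [pvLoopA]

-- ===== VERDICT (by name: the statement is the Claim_ definition above) =====
theorem check_if_emoticon_spec : Claim_equal_check_if_emoticon := by
  intro w _
  unfold Spec_check_if_emoticon
  rw [pv_A_eq]
  unfold check_if_emoticon_alt
  have hw : String.ofList w.toList = w := String.ofList_toList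
  rcases hl : w.toList with _ | ⟨a, _ | ⟨b, _ | ⟨c, _ | ⟨d, rest⟩⟩⟩⟩
  all_goals rw [hl] at hw
  -- length 0, 1, ≥4: B returns w, A's memberships are all false
  · rw [← hw]; simp
  · rw [← hw]; simp [pv_ofList_eq_lit]
  -- length 2
  · rw [← hw]
    simp only [pv_ofList_eq_lit, List.mem_cons]
    by_cases ha : a = ':'
    · subst ha
      by_cases h1 : b = 'd'; · subst h1; decide
      by_cases h2 : b = 'D'; · subst h2; decide
      by_cases h3 : b = ')'; · subst h3; decide
      by_cases h4 : b = 'p'; · subst h4; decide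
      by_cases h5 : b = 'P'; · subst h5; decide
      by_cases h6 : b = 'o'; · subst h6; decide
      by_cases h7 : b = '('; · subst h7; decide
      by_cases h8 : b = '/'; · subst h8; decide
      simp [pvMouth, h1, h2, h3, h4, h5, h6, h7, h8]
    · by_cases hs : a = ';'
      · subst hs
        by_cases hp : b = ')'
        · subst hp; decide
        · simp [hp]
      · simp [ha, hs]
  -- length 3
  · rw [← hw]
    simp only [pv_ofList_eq_lit, List.mem_cons]
    by_cases ha : a = ':' ∧ b = '-'
    · obtain ⟨ha1, ha2⟩ := ha; subst ha1; subst ha2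
      by_cases h1 : c = 'd'; · subst h1; decide
      by_cases h2 : c = 'D'; · subst h2; decide
      by_cases h3 : c = ')'; · subst h3; decide
      by_cases h4 : c = 'p'; · subst h4; decide
      by_cases h5 : c = 'P'; · subst h5; decide
      by_cases h6 : c = 'o'; · subst h6; decide
      by_cases h7 : c = '('; · subst h7; decide
      by_cases h8 : c = '/'; · subst h8; decide
      simp [pvMouth, h1, h2, h3, h4, h5, h6, h7, h8]
    · by_cases hs : a = ';'
      · subst hs
        by_cases hbn : b = '-'
        · subst hbn
          by_cases hp : c = ')'
          · subst hp; decide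
          · simp [hp]
        · simp [hbn]
      · have ha' : a ≠ ':' ∨ b ≠ '-' := by tauto
        by_cases hq : a = ':'
        · subst hq
          have hbn : b ≠ '-' := by tauto
          by_cases hc : b = '\''
          · subst hc
            by_cases hp : c = '('
            · subst hp; decide
            · simp [hbn, hs, hp]
          · simp [hbn, hs, hc]
        · simp [hq, hs]
  · rw [← hw]; simp [pv_ofList_eq_lit]
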